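-- pv_equiv track=rewrite | github.com/kirikariko/MLB | mlb_king.py | _lineup_game_id_variants_in_set
-- ===== SOURCE A (Python) =====
-- def _lineup_game_id_variants_in_set(gid, today_gids):
--     """Check if any abbreviation variant of `gid` is in today_gids.
--     Handles abbreviation mismatches (WSH↔WSN, SD↔SDP, TB↔TBR, KC↔KCR, SF↔SFG, AZ↔ARI)."""
--     if '_' not in gid:
--         return False
--     h, a = gid.split('_', 1)
--     for hv in _lineup_game_id_variants(h, a):
--         if hv in today_gids:
--             return True
--     return False
--
-- def _lineup_game_id_variants(home_abbr, away_abbr):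
--     """Generate possible GAME_ID variants for lineup JSON lookup.
--     Lineup JSON may use different abbreviations (WSH vs WSN, SD vs SDP, etc.)."""
--     # Standard abbreviation -> lineup JSON abbreviation mapping
--     ALT = {
--         'WSN': 'WSH', 'SDP': 'SD', 'TBR': 'TB', 'KCR': 'KC',
--         'SFG': 'SF', 'ARI': 'AZ',
--         # Reverse mappings too
--         'WSH': 'WSN', 'SD': 'SDP', 'TB': 'TBR', 'KC': 'KCR',
--         'SF': 'SFG', 'AZ': 'ARI',
--     }
--     homes = [home_abbr] + ([ALT[home_abbr]] if home_abbr in ALT else [])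
--     aways = [away_abbr] + ([ALT[away_abbr]] if away_abbr in ALT else [])
--     variants = []
--     for h in homes:
--         for a in aways:
--             variants.append(f"{h}_{a}")
--     return variants
-- ===== SOURCE B (Python) =====
-- # B: instead of generating up to 4 variant strings and probing the list for each,
-- # canonicalize abbreviations (map each alias to one representative) and do one
-- # pass over today_gids building a set of canonical (home, away) pairs.
-- _CANON = {'WSN': 'WSH', 'SDP': 'SD', 'TBR': 'TB', 'KCR': 'KC', 'SFG': 'SF', 'ARI': 'AZ'}
--
--
-- def _lineup_game_id_variants_in_set(gid, today_gids):
--     if '_' not in gid: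
--         return False
--     h, a = gid.split('_', 1)
--     key = (_CANON.get(h, h), _CANON.get(a, a))
--     canon_today = set()
--     for t in today_gids:
--         if '_' in t:
--             th, ta = t.split('_', 1)
--             canon_today.add((_CANON.get(th, th), _CANON.get(ta, ta)))
--     return key in canon_today
-- ===== Notes on version B (the rewrite author's own statement) =====
-- stated objective: alternative
-- what changed: Replaces generate-up-to-4-variants-and-probe-the-list (O(k*n) string comparisons) with a canonicalization map applied to both halves: one pass builds a set of canonicalized today_gids and the canonicalized gid is looked up once.
import Mathlib
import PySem

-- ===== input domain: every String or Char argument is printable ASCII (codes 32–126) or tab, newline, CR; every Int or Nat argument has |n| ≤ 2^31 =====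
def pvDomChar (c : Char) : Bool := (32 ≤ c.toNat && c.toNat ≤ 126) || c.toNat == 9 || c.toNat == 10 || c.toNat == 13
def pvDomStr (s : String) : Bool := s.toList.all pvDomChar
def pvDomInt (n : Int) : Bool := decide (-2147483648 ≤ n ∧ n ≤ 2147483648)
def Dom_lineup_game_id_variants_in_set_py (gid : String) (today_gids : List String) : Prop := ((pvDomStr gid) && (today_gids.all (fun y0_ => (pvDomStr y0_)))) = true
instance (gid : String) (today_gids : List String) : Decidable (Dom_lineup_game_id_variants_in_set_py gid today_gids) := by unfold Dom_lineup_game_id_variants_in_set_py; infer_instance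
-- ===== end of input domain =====

-- B canonicalizes both halves of each id through a 6-entry alias map and looks the
-- canonical pair up in a set built in one pass, instead of A's generate-variants-and-probe.

-- ===== PORT A =====
-- the ALT dict of _lineup_game_id_variants (both directions)
def pvALT : PySem.Dict String String := PySem.Dict.mk
  [("WSN","WSH"),("SDP","SD"),("TBR","TB"),("KCR","KC"),("SFG","SF"),("ARI","AZ"),
   ("WSH","WSN"),("SD","SDP"),("TB","TBR"),("KC","KCR"),("SF","SFG"),("AZ","ARI")]

-- _lineup_game_id_variants: homes/aways lists, nested loop appending f"{h}_{a}"
def lineup_game_id_variants_py (home_abbr away_abbr : String) : List String :=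
  let homes := [home_abbr] ++ (if pvALT.contains home_abbr then [(pvALT.get? home_abbr).getD ""] else [])
  let aways := [away_abbr] ++ (if pvALT.contains away_abbr then [(pvALT.get? away_abbr).getD ""] else [])
  homes.foldl (fun vs h => aways.foldl (fun vs a => vs ++ [h ++ "_" ++ a]) vs) []

def lineup_game_id_variants_in_set_py (gid : String) (today_gids : List String) : Bool :=
  if !(PySem.Str.isIn "_" gid) then false
  else match PySem.Str.splitMax? gid "_" 1 with
    | some [h, a] => (lineup_game_id_variants_py h a).any (fun hv => today_gids.contains hv)
    | _ => false   -- unreachable: split('_', 1) with '_' in gid yields exactly two pieces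

-- ===== PORT B =====
-- the one-directional _CANON dict of Source B
def pvCANON : PySem.Dict String String := PySem.Dict.mk
  [("WSN","WSH"),("SDP","SD"),("TBR","TB"),("KCR","KC"),("SFG","SF"),("ARI","AZ")]

def lineup_game_id_variants_in_set_py_alt (gid : String) (today_gids : List String) : Bool :=
  if !(PySem.Str.isIn "_" gid) then false
  else match PySem.Str.splitMax? gid "_" 1 with
    | none => false
    | some pieces =>
      -- th, ta = unpack of the exactly-two pieces (hand-port of tuple unpacking)
      if pieces.length = 2 then
        let h := pieces[0]!
        let a := pieces[1]!
        let key : String × String := (pvCANON.getD h h, pvCANON.getD a a)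
        let canon_today := today_gids.foldl (fun s t =>
          if PySem.Str.isIn "_" t then
            match PySem.Str.splitMax? t "_" 1 with
            | none => s
            | some ps =>
              if ps.length = 2 then s.add (pvCANON.getD ps[0]! ps[0]!, pvCANON.getD ps[1]! ps[1]!)
              else s
          else s) (PySem.Set.empty : PySem.Set (String × String))
        canon_today.contains key
      else false   -- unreachable: split('_', 1) with '_' in t yields exactly two pieces

-- ===== PRECONDITION & SPEC =====
def Spec_lineup_game_id_variants_in_set_py (gid : String) (today_gids : List String) (out : Bool) : Prop := out = lineup_game_id_variants_in_set_py_alt gid today_gids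
instance (gid : String) (today_gids : List String) (out : Bool) : Decidable (Spec_lineup_game_id_variants_in_set_py gid today_gids out) := by unfold Spec_lineup_game_id_variants_in_set_py; infer_instance

-- ===== CLAIM (what is proved, stated in full; the proofs are below) =====
def Claim_equal_lineup_game_id_variants_in_set_py : Prop := ∀ (gid : String) (today_gids : List String), Dom_lineup_game_id_variants_in_set_py gid today_gids → Spec_lineup_game_id_variants_in_set_py gid today_gids (lineup_game_id_variants_in_set_py gid today_gids)

-- ===== LEMMAS AND PROOFS =====

-- the part of l before the first '_' and the part after it
def pvBfr (l : List Char) : List Char := l.takeWhile (fun c => c != '_')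
def pvAft (l : List Char) : List Char := l.drop ((pvBfr l).length + 1)

theorem pvBfr_cons_ne (c : Char) (l : List Char) (h : c ≠ '_') : pvBfr (c :: l) = c :: pvBfr l := by
  simp [pvBfr, h]

theorem pvAft_cons_ne (c : Char) (l : List Char) (h : c ≠ '_') : pvAft (c :: l) = pvAft l := by
  simp [pvAft, pvBfr_cons_ne c l h]

theorem pvBfr_cons_us (l : List Char) : pvBfr ('_' :: l) = [] := by simp [pvBfr]

theorem pvAft_cons_us (l : List Char) : pvAft ('_' :: l) = l := by simp [pvAft, pvBfr_cons_us]

theorem pvBfr_no_us (l : List Char) : '_' ∉ pvBfr l := by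
  intro hm
  have := List.mem_takeWhile_imp hm
  simp at this

theorem pvJoin (l : List Char) (h : '_' ∈ l) : l = pvBfr l ++ '_' :: pvAft l := by
  induction l with
  | nil => simp at h
  | cons c rest ih =>
    by_cases hc : c = '_'
    · subst hc; simp [pvBfr_cons_us, pvAft_cons_us]
    · have hr : '_' ∈ rest := by
        rcases List.mem_cons.mp h with h1 | h1
        · exact absurd h1.symm hc
        · exact h1
      rw [pvBfr_cons_ne c rest hc, pvAft_cons_ne c rest hc]
      simpa using ih hr

theorem pvBfr_append (p q : List Char) (hp : '_' ∉ p) : pvBfr (p ++ '_' :: q) = p := by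
  induction p with
  | nil => simp [pvBfr_cons_us]
  | cons c rest ih =>
    have hc : c ≠ '_' := fun he => hp (by simp [he])
    have hr : '_' ∉ rest := fun hm => hp (by simp [hm])
    rw [List.cons_append, pvBfr_cons_ne c _ hc, ih hr]

theorem pvAft_append (p q : List Char) (hp : '_' ∉ p) : pvAft (p ++ '_' :: q) = q := by
  induction p with
  | nil => simp [pvAft_cons_us]
  | cons c rest ih =>
    have hc : c ≠ '_' := fun he => hp (by simp [he])
    have hr : '_' ∉ rest := fun hm => hp (by simp [hm])
    rw [List.cons_append, pvAft_cons_ne c _ hc, ih hr]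

-- characterization of splitOnMax.go with maxsplit exhausted
theorem pvGo0 (fuel : Nat) (l cur : List Char) (acc : List (List Char)) :
    PySem.Chars.splitOnMax.go ['_'] fuel 0 l cur acc = ((cur.reverse ++ l) :: acc).reverse := by
  cases fuel with
  | zero => simp [PySem.Chars.splitOnMax.go]
  | succ n => cases l with
    | nil => simp [PySem.Chars.splitOnMax.go]
    | cons c rest => simp [PySem.Chars.splitOnMax.go]

theorem pvGo1 (l : List Char) (fuel : Nat) (cur : List Char) (acc : List (List Char))
    (hf : l.length < fuel) :
    PySem.Chars.splitOnMax.go ['_'] fuel 1 l cur acc =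
      if '_' ∈ l then acc.reverse ++ [cur.reverse ++ pvBfr l, pvAft l]
      else acc.reverse ++ [cur.reverse ++ l] := by
  induction l generalizing fuel cur acc with
  | nil =>
    cases fuel with
    | zero => omega
    | succ n => simp [PySem.Chars.splitOnMax.go]
  | cons c rest ih =>
    cases fuel with
    | zero => omega
    | succ n =>
      by_cases hc : c = '_'
      · subst hc
        simp only [PySem.Chars.splitOnMax.go]
        rw [if_neg (by omega)]
        rw [if_pos (by simp [List.isPrefixOf])]
        simp [pvGo0, pvBfr_cons_us, pvAft_cons_us]
      · simp only [PySem.Chars.splitOnMax.go]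
        rw [if_neg (by omega)]
        rw [if_neg (by simp [List.isPrefixOf]; exact fun he => hc he.symm)]
        rw [ih n (c :: cur) acc (by simpa using Nat.lt_of_succ_lt_succ hf)]
        rw [pvBfr_cons_ne c rest hc, pvAft_cons_ne c rest hc]
        by_cases hm : '_' ∈ rest
        · rw [if_pos hm, if_pos (by simp [hm])]
          simp
        · rw [if_neg hm, if_neg (by simp [hm, Ne.symm hc])]
          simp

theorem pvSplit_eq (s : String) (h : '_' ∈ s.toList) :
    PySem.Str.splitMax? s "_" 1 =
      some [String.ofList (pvBfr s.toList), String.ofList (pvAft s.toList)] := by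
  unfold PySem.Str.splitMax? PySem.Chars.splitMax? PySem.Chars.splitOnMax
  rw [if_neg (by decide)]
  rw [if_neg (by omega)]
  rw [show ((1 : Int).toNat) = 1 from rfl]
  rw [show ("_".toList) = ['_'] from rfl]
  rw [pvGo1 s.toList (s.toList.length + 1) [] [] (by omega)]
  rw [if_pos h]
  simp

theorem pvIsIn_iff (s : String) : PySem.Str.isIn "_" s = true ↔ '_' ∈ s.toList := by
  rw [PySem.Str.isIn_iff_infix]
  exact List.singleton_infix_iff '_' s.toList

-- evaluation of the canonicalization map as an if-chain
theorem pvCanon_eval (y : String) : pvCANON.getD y y =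
    if y = "WSN" then "WSH" else if y = "SDP" then "SD" else if y = "TBR" then "TB"
    else if y = "KCR" then "KC" else if y = "SFG" then "SF" else if y = "ARI" then "AZ" else y := by
  by_cases h0 : y = "WSN"
  · subst h0; decide
  by_cases h1 : y = "SDP"
  · subst h1; decide
  by_cases h2 : y = "TBR"
  · subst h2; decide
  by_cases h3 : y = "KCR"
  · subst h3; decide
  by_cases h4 : y = "SFG"
  · subst h4; decide
  by_cases h5 : y = "ARI"
  · subst h5; decide
  rw [if_neg h0, if_neg h1, if_neg h2, if_neg h3, if_neg h4, if_neg h5]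
  simp [pvCANON, PySem.Dict.getD, PySem.Dict.get?, beq_iff_eq, Ne.symm h0, Ne.symm h1, Ne.symm h2, Ne.symm h3, Ne.symm h4, Ne.symm h5]

-- evaluation of A's ALT lookup as an if-chain
theorem pvAlt_eval (y : String) : pvALT.get? y =
    if y = "WSN" then some "WSH" else if y = "SDP" then some "SD" else if y = "TBR" then some "TB"
    else if y = "KCR" then some "KC" else if y = "SFG" then some "SF" else if y = "ARI" then some "AZ"
    else if y = "WSH" then some "WSN" else if y = "SD" then some "SDP" else if y = "TB" then some "TBR"
    else if y = "KC" then some "KCR" else if y = "SF" then some "SFG" else if y = "AZ" then some "ARI"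
    else none := by
  by_cases h0 : y = "WSN"
  · subst h0; decide
  by_cases h1 : y = "SDP"
  · subst h1; decide
  by_cases h2 : y = "TBR"
  · subst h2; decide
  by_cases h3 : y = "KCR"
  · subst h3; decide
  by_cases h4 : y = "SFG"
  · subst h4; decide
  by_cases h5 : y = "ARI"
  · subst h5; decide
  by_cases h6 : y = "WSH"
  · subst h6; decide
  by_cases h7 : y = "SD"
  · subst h7; decide
  by_cases h8 : y = "TB"
  · subst h8; decide
  by_cases h9 : y = "KC"
  · subst h9; decide
  by_cases h10 : y = "SF"
  · subst h10; decide
  by_cases h11 : y = "AZ"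
  · subst h11; decide
  rw [if_neg h0, if_neg h1, if_neg h2, if_neg h3, if_neg h4, if_neg h5, if_neg h6, if_neg h7, if_neg h8, if_neg h9, if_neg h10, if_neg h11]
  simp [pvALT, PySem.Dict.get?, beq_iff_eq, Ne.symm h0, Ne.symm h1, Ne.symm h2, Ne.symm h3, Ne.symm h4, Ne.symm h5, Ne.symm h6, Ne.symm h7, Ne.symm h8, Ne.symm h9, Ne.symm h10, Ne.symm h11]

-- the homes/aways list of A's helper
def pvHomes (h : String) : List String :=
  [h] ++ (if pvALT.contains h then [(pvALT.get? h).getD ""] else [])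

theorem pvHomes_eval (h : String) : pvHomes h =
    if h = "WSN" then ["WSN","WSH"] else if h = "SDP" then ["SDP","SD"] else if h = "TBR" then ["TBR","TB"]
    else if h = "KCR" then ["KCR","KC"] else if h = "SFG" then ["SFG","SF"] else if h = "ARI" then ["ARI","AZ"]
    else if h = "WSH" then ["WSH","WSN"] else if h = "SD" then ["SD","SDP"] else if h = "TB" then ["TB","TBR"]
    else if h = "KC" then ["KC","KCR"] else if h = "SF" then ["SF","SFG"] else if h = "AZ" then ["AZ","ARI"]
    else [h] := by
  by_cases h0 : h = "WSN"
  · subst h0; decide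
  by_cases h1 : h = "SDP"
  · subst h1; decide
  by_cases h2 : h = "TBR"
  · subst h2; decide
  by_cases h3 : h = "KCR"
  · subst h3; decide
  by_cases h4 : h = "SFG"
  · subst h4; decide
  by_cases h5 : h = "ARI"
  · subst h5; decide
  by_cases h6 : h = "WSH"
  · subst h6; decide
  by_cases h7 : h = "SD"
  · subst h7; decide
  by_cases h8 : h = "TB"
  · subst h8; decide
  by_cases h9 : h = "KC"
  · subst h9; decide
  by_cases h10 : h = "SF"
  · subst h10; decide
  by_cases h11 : h = "AZ"
  · subst h11; decide
  rw [if_neg h0, if_neg h1, if_neg h2, if_neg h3, if_neg h4, if_neg h5, if_neg h6, if_neg h7, if_neg h8, if_neg h9, if_neg h10, if_neg h11]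
  unfold pvHomes
  rw [PySem.Dict.contains_eq_isSome_get?, pvAlt_eval h]
  rw [if_neg h0, if_neg h1, if_neg h2, if_neg h3, if_neg h4, if_neg h5, if_neg h6, if_neg h7, if_neg h8, if_neg h9, if_neg h10, if_neg h11]
  simp

set_option maxHeartbeats 2000000 in
theorem pvMem_homes_iff (h th : String) :
    th ∈ pvHomes h ↔ pvCANON.getD th th = pvCANON.getD h h := by
  rw [pvHomes_eval h, pvCanon_eval th, pvCanon_eval h]
  split_ifs <;> simp_all [eq_comm]

set_option maxHeartbeats 2000000 in
theorem pvHomes_no_us (h th : String) (hh : '_' ∉ h.toList) (hm : th ∈ pvHomes h) :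
    '_' ∉ th.toList := by
  rw [pvHomes_eval h] at hm
  split_ifs at hm <;> simp only [List.mem_cons, List.not_mem_nil, or_false] at hm <;>
    first
      | (rcases hm with rfl | rfl <;> decide)
      | (subst hm; exact hh)

theorem pvNested (f : String → String → String) (hs as acc : List String) :
    hs.foldl (fun vs h => as.foldl (fun vs a => vs ++ [f h a]) vs) acc
      = acc ++ hs.flatMap (fun h => as.map (f h)) := by
  induction hs generalizing acc with
  | nil => simp
  | cons h rest ih =>
    rw [List.foldl_cons, PySem.List.foldl_append_eq_flatMap, ih, List.flatMap_cons]
    simp [← List.map_eq_flatMap]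

theorem pvVariants_eq (h a : String) :
    lineup_game_id_variants_py h a = (pvHomes h).flatMap (fun h' => (pvHomes a).map (fun a' => h' ++ "_" ++ a')) := by
  unfold lineup_game_id_variants_py
  rw [pvNested]
  simp [pvHomes]

theorem pvMem_variants_iff (h a t : String) (hh : '_' ∉ h.toList) :
    t ∈ lineup_game_id_variants_py h a ↔
      ('_' ∈ t.toList ∧
       pvCANON.getD (String.ofList (pvBfr t.toList)) (String.ofList (pvBfr t.toList)) = pvCANON.getD h h ∧
       pvCANON.getD (String.ofList (pvAft t.toList)) (String.ofList (pvAft t.toList)) = pvCANON.getD a a) := by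
  rw [pvVariants_eq]
  simp only [List.mem_flatMap, List.mem_map]
  constructor
  · rintro ⟨h', hh', a', ha', rfl⟩
    have hh'u : '_' ∉ h'.toList := pvHomes_no_us h h' hh hh'
    have hsplit : (h' ++ "_" ++ a').toList = h'.toList ++ '_' :: a'.toList := by
      simp
    refine ⟨by simp [hsplit], ?_, ?_⟩
    · rw [hsplit, pvBfr_append _ _ hh'u, String.ofList_toList]
      exact (pvMem_homes_iff h h').mp hh'
    · rw [hsplit, pvAft_append _ _ hh'u, String.ofList_toList]
      exact (pvMem_homes_iff a a').mp ha'
  · rintro ⟨hmem, hcb, hca⟩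
    refine ⟨String.ofList (pvBfr t.toList), (pvMem_homes_iff _ _).mpr hcb,
            String.ofList (pvAft t.toList), (pvMem_homes_iff _ _).mpr hca, ?_⟩
    apply String.toList_inj.mp
    simp [String.toList_ofList]
    exact (pvJoin t.toList hmem).symm

theorem pvFoldB (l : List String) (s : PySem.Set (String × String)) (k : String × String) :
    (l.foldl (fun s t =>
        if PySem.Str.isIn "_" t then
          match PySem.Str.splitMax? t "_" 1 with
          | none => s
          | some ps =>
            if ps.length = 2 then s.add (pvCANON.getD ps[0]! ps[0]!, pvCANON.getD ps[1]! ps[1]!)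
            else s
        else s) s).contains k = true ↔
      (s.contains k = true ∨ ∃ t ∈ l, '_' ∈ t.toList ∧
        (pvCANON.getD (String.ofList (pvBfr t.toList)) (String.ofList (pvBfr t.toList)),
         pvCANON.getD (String.ofList (pvAft t.toList)) (String.ofList (pvAft t.toList))) = k) := by
  induction l generalizing s with
  | nil => simp
  | cons t rest ih =>
    simp only [List.foldl_cons]
    by_cases hmem : '_' ∈ t.toList
    · rw [if_pos ((pvIsIn_iff t).mpr hmem), pvSplit_eq t hmem]
      simp only [List.length_cons, List.length_nil, Nat.reduceAdd, reduceIte,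
        List.getElem!_cons_zero, List.getElem!_cons_succ]
      rw [ih]
      rw [PySem.Set.contains_iff, PySem.Set.mem_add, ← PySem.Set.contains_iff]
      constructor
      · rintro (h1 | h2) 
        · rcases h1 with h1 | h1
          · exact Or.inl h1
          · exact Or.inr ⟨t, by simp, hmem, h1.symm⟩
        · rcases h2 with ⟨t', ht', h'⟩
          exact Or.inr ⟨t', by simp [ht'], h'⟩
      · rintro (h1 | ⟨t', ht', hmem', hk⟩)
        · exact Or.inl (Or.inl h1)
        · rcases List.mem_cons.mp ht' with rfl | ht'
          · exact Or.inl (Or.inr hk.symm)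
          · exact Or.inr ⟨t', ht', hmem', hk⟩
    · rw [if_neg (by rw [pvIsIn_iff]; exact hmem)]
      rw [ih]
      constructor
      · rintro (h1 | ⟨t', ht', h'⟩)
        · exact Or.inl h1
        · exact Or.inr ⟨t', by simp [ht'], h'⟩
      · rintro (h1 | ⟨t', ht', hmem', hk⟩)
        · exact Or.inl h1
        · rcases List.mem_cons.mp ht' with rfl | ht'
          · exact absurd hmem' hmem
          · exact Or.inr ⟨t', ht', hmem', hk⟩

-- ===== VERDICT (by name: the statement is the Claim_ definition above) =====
theorem lineup_game_id_variants_in_set_py_spec : Claim_equal_lineup_game_id_variants_in_set_py := by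
  intro gid tg _
  unfold Spec_lineup_game_id_variants_in_set_py
  unfold lineup_game_id_variants_in_set_py lineup_game_id_variants_in_set_py_alt
  by_cases hm : '_' ∈ gid.toList
  · rw [(pvIsIn_iff gid).mpr hm]
    simp only [Bool.not_true, Bool.false_eq_true, if_false]
    rw [pvSplit_eq gid hm]
    have hH : '_' ∉ (String.ofList (pvBfr gid.toList)).toList := by
      rw [String.toList_ofList]; exact pvBfr_no_us gid.toList
    apply Bool.eq_iff_iff.mpr
    simp only [List.length_cons, List.length_nil, Nat.reduceAdd, reduceIte,
      List.getElem!_cons_zero, List.getElem!_cons_succ]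
    rw [List.any_eq_true, pvFoldB]
    simp only [PySem.Set.contains_iff]
    constructor
    · rintro ⟨v, hv, hvt⟩
      rcases (pvMem_variants_iff _ _ v hH).mp hv with ⟨hvm, hc1, hc2⟩
      refine Or.inr ⟨v, by simpa using hvt, hvm, by rw [hc1, hc2]⟩
    · rintro (hfalse | ⟨t, ht, hmem', hk⟩)
      · exact absurd hfalse (by simp [PySem.Set.empty])
      · refine ⟨t, ?_, by simpa using ht⟩
        exact (pvMem_variants_iff _ _ t hH).mpr ⟨hmem', congrArg Prod.fst hk, congrArg Prod.snd hk⟩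
  · rw [show PySem.Str.isIn "_" gid = false from
      Bool.eq_false_iff.mpr (fun ht => hm ((pvIsIn_iff gid).mp ht))]
    simp
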